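-- pv_equiv track=rewrite | github.com/Yifan-Gao/pke | combine_all_langs_and_evaluate.py | _normalize_keyphrase
-- ===== SOURCE A (Python) =====
-- import string
--
-- def _normalize_keyphrase(kp):
--     def white_space_fix(text):
--         return ' '.join(text.split())
--
--     def remove_punc(text):
--         exclude = set(string.punctuation)
--         return ''.join(ch for ch in text if ch not in exclude)
--
--     def lower(text):
--         return text.lower()
--
--     return white_space_fix(remove_punc(lower(kp)))
-- ===== SOURCE B (Python) =====
-- import string
--
-- def _normalize_keyphrase(kp):
--     # single fused left-to-right pass: lowercase, drop punctuation, collapse whitespace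
--     punct = set(string.punctuation)
--     out = []
--     pending = False
--     for ch in kp:
--         lc = ch.lower()
--         if lc in punct:
--             continue
--         if lc.isspace():
--             pending = True
--         else:
--             if pending and out:
--                 out.append(' ')
--             out.append(lc)
--             pending = False
--     return ''.join(out)
-- ===== Notes on version B (the rewrite author's own statement) =====
-- stated objective: alternative
-- what changed: Replaces A's three separate passes (lower, filter punctuation, split+join to collapse whitespace) by one fused character scan that maintains a pending-space flag and emits the normalized string directly.
import Mathlib
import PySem

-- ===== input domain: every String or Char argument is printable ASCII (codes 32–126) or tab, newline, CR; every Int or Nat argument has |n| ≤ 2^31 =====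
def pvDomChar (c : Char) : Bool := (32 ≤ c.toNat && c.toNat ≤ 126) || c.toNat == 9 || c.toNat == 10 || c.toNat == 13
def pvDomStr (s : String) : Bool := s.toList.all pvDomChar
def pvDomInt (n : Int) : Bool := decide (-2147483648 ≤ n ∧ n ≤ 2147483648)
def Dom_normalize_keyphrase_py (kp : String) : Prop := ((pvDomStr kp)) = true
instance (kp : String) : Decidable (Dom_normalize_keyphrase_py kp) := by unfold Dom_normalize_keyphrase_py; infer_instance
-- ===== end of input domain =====

-- B fuses A's three passes (lower / remove punctuation / whitespace-collapse) into one
-- character scan with a pending-space flag; same return value, no speed claim.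

-- ===== PORT A =====
-- string.punctuation
def pvPunct : List Char := "!\"#$%&'()*+,-./:;<=>?@[\\]^_`{|}~".toList

def normalize_keyphrase_py (kp : String) : String :=
  -- lower(kp)
  let lowered : String := PySem.Str.lower kp
  -- remove_punc: exclude = set(string.punctuation); ''.join(ch for ch in text if ch not in exclude)
  -- (''.join over single characters = the string of the kept characters, exact)
  let exclude : PySem.Set Char := PySem.Set.ofList pvPunct
  let noPunc : String := String.ofList (lowered.toList.filter (fun ch => !(exclude.contains ch)))
  -- white_space_fix: ' '.join(text.split())
  PySem.Str.join " " (PySem.Str.split₀ noPunc)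

-- ===== PORT B =====
-- the loop of Source B: out is the emitted characters, pending the owed-space flag
def pvScan : List Char → List Char → Bool → List Char
  | [], out, _ => out
  | c :: rest, out, pending =>
    let lc := PySem.Chars.lowerChar c
    if pvPunct.contains lc then pvScan rest out pending
    else if PySem.Chars.isspace lc then pvScan rest out true
    else pvScan rest (out ++ (if pending && !out.isEmpty then [' ', lc] else [lc])) false

def normalize_keyphrase_py_alt (kp : String) : String :=
  String.ofList (pvScan kp.toList [] false)

-- ===== PRECONDITION & SPEC =====
def Spec_normalize_keyphrase_py (kp : String) (out : String) : Prop := out = normalize_keyphrase_py_alt kp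
instance (kp : String) (out : String) : Decidable (Spec_normalize_keyphrase_py kp out) := by unfold Spec_normalize_keyphrase_py; infer_instance

-- ===== CLAIM (what is proved, stated in full; the proofs are below) =====
def Claim_equal_normalize_keyphrase_py : Prop := ∀ (kp : String), Dom_normalize_keyphrase_py kp → Spec_normalize_keyphrase_py kp (normalize_keyphrase_py kp)

-- ===== LEMMAS AND PROOFS =====

-- whitespace-collapse scan alone (proof helper): pvScan after lowering+punctuation filtering
def pvWScan : List Char → List Char → Bool → List Char
  | [], out, _ => out
  | c :: rest, out, pending =>
    if PySem.Chars.isspace c then pvWScan rest out true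
    else pvWScan rest (out ++ (if pending && !out.isEmpty then [' ', c] else [c])) false

theorem pvScan_eq_wscan (cs : List Char) (out : List Char) (pending : Bool) :
    pvScan cs out pending
      = pvWScan ((PySem.Chars.lower cs).filter (fun c => !pvPunct.contains c)) out pending := by
  induction cs generalizing out pending with
  | nil => simp [pvScan, pvWScan, PySem.Chars.lower]
  | cons c rest ih =>
    simp only [PySem.Chars.lower, List.map_cons, List.filter_cons] at *
    by_cases hp : PySem.Chars.lowerChar c ∈ pvPunct
    · simp [pvScan, hp, ih]
    · by_cases hs : PySem.Chars.isspace (PySem.Chars.lowerChar c)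
      · simp [pvScan, pvWScan, hp, hs, ih]
      · simp [pvScan, pvWScan, hp, hs, ih]

-- join over a snoc of words
theorem pvJoin_snoc (ws : List (List Char)) (w : List Char) :
    PySem.Chars.join [' '] (ws ++ [w])
      = PySem.Chars.join [' '] ws ++ (if ws.isEmpty then [] else [' ']) ++ w := by
  induction ws with
  | nil => simp [PySem.Chars.join, List.intercalate]
  | cons a ws ih =>
    cases ws with
    | nil => simp [PySem.Chars.join, List.intercalate]
    | cons b ws' =>
      simp only [PySem.Chars.join, List.cons_append] at *
      simp only [show ∀ (l : List (List Char)), [' '].intercalate (a :: b :: l)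
          = a ++ [' '] ++ [' '].intercalate (b :: l) from fun l => by
        simp [List.intercalate]]
      simp [ih]

theorem pvJoin_ne_nil (ws : List (List Char)) (h : ws ≠ []) (hw : ∀ w ∈ ws, w ≠ []) :
    PySem.Chars.join [' '] ws ≠ [] := by
  cases ws with
  | nil => exact absurd rfl h
  | cons a ws' =>
    have ha : a ≠ [] := hw a (by simp)
    cases ws' with
    | nil => simpa [PySem.Chars.join, List.intercalate] using ha
    | cons b ws'' =>
      simp only [PySem.Chars.join]
      intro hcontra
      apply ha
      have : a ++ ([' '] ++ [' '].intercalate (b :: ws'')) = [] := by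
        simpa [List.intercalate, List.append_assoc] using hcontra
      exact (List.append_eq_nil_iff.mp this).1

-- text represented by a split₀.go state
def pvRepr (cur : List Char) (acc : List (List Char)) : List Char :=
  PySem.Chars.join [' '] acc.reverse
    ++ (if cur.isEmpty then [] else (if acc.isEmpty then [] else [' ']) ++ cur.reverse)

theorem pvWScan_go (ds : List Char) (cur : List Char) (acc : List (List Char)) (pending : Bool)
    (h1 : cur ≠ [] → pending = false)
    (h2 : acc ≠ [] → cur = [] → pending = true)
    (h3 : ∀ w ∈ acc, w ≠ []) :
    pvWScan ds (pvRepr cur acc) pending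
      = PySem.Chars.join [' '] (PySem.Chars.split₀.go ds cur acc) := by
  induction ds generalizing cur acc pending with
  | nil =>
    by_cases hc : cur = []
    · simp [pvWScan, pvRepr, PySem.Chars.split₀.go, hc]
    · simp [pvWScan, pvRepr, PySem.Chars.split₀.go, hc, pvJoin_snoc, List.isEmpty_iff]
  | cons c rest ih =>
    by_cases hs : PySem.Chars.isspace c
    · by_cases hc : cur = []
      · subst hc
        simpa [pvWScan, hs, PySem.Chars.split₀.go] using
          ih [] acc true (by simp) (fun _ _ => rfl) h3
      · have hstep : pvRepr [] (cur.reverse :: acc) = pvRepr cur acc := by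
          simp [pvRepr, pvJoin_snoc, List.isEmpty_iff, hc]
        have hacc : ∀ w ∈ cur.reverse :: acc, w ≠ [] := by
          intro w hw
          rw [List.mem_cons] at hw
          rcases hw with hw | hw
          · subst hw; simpa using hc
          · exact h3 w hw
        have := ih [] (cur.reverse :: acc) true (by simp) (fun _ _ => rfl) hacc
        rw [hstep] at this
        simpa [pvWScan, hs, PySem.Chars.split₀.go, hc] using this
    · -- word character
      have hstep : (pvRepr cur acc ++ if pending && !(pvRepr cur acc).isEmpty then [' ', c] else [c])
          = pvRepr (c :: cur) acc := by
        by_cases hc : cur = []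
        · subst hc
          by_cases ha : acc = []
          · subst ha
            simp [pvRepr, PySem.Chars.join, List.intercalate]
          · have hp : pending = true := h2 ha rfl
            have hne : PySem.Chars.join [' '] acc.reverse ≠ [] :=
              pvJoin_ne_nil _ (by simp [ha]) (by intro w hw; exact h3 w (by simpa using hw))
            simp [pvRepr, hp, ha, List.isEmpty_iff, hne]
        · have hp : pending = false := h1 hc
          simp [pvRepr, hp, hc, List.isEmpty_iff]
      have hrec := ih (c :: cur) acc false (fun _ => rfl)
        (by intro _ h; exact absurd h (by simp)) h3
      rw [← hstep] at hrec
      simpa [pvWScan, hs, PySem.Chars.split₀.go] using hrec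

theorem pvSet_punct : (PySem.Set.ofList pvPunct : List Char) = pvPunct := by decide

-- ===== VERDICT (by name: the statement is the Claim_ definition above) =====
theorem normalize_keyphrase_py_spec : Claim_equal_normalize_keyphrase_py := by
  intro kp _
  unfold Spec_normalize_keyphrase_py
  apply String.toList_injective
  unfold normalize_keyphrase_py normalize_keyphrase_py_alt
  rw [PySem.Str.toList_join]
  rw [PySem.Str.split₀_map_toList]
  have hfl : (String.ofList ((PySem.Str.lower kp).toList.filter
      (fun ch => !((PySem.Set.ofList pvPunct : List Char).contains ch)))).toList
      = (PySem.Chars.lower kp.toList).filter (fun c => !pvPunct.contains c) := by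
    simp [pvSet_punct, PySem.Str.toList_lower]
  rw [hfl]
  have hgo := pvWScan_go ((PySem.Chars.lower kp.toList).filter (fun c => !pvPunct.contains c))
    [] [] false (by simp) (by simp) (by simp)
  simp only [pvRepr, List.reverse_nil, List.isEmpty_nil] at hgo
  simp only [PySem.Chars.join, List.intercalate] at hgo ⊢
  simp only [show ∀ ds, PySem.Chars.split₀ ds = PySem.Chars.split₀.go ds [] [] from
    fun _ => rfl]
  simp only [show (" ".toList : List Char) = [' '] from by decide]
  simp only [List.nil_append, if_true] at hgo
  rw [← hgo, ← pvScan_eq_wscan]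
  simp [String.toList_ofList]
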